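-- pv_equiv track=rewrite | github.com/shivangi00/advent_of_code_2025 | Day 7/solution.py | total_splits
-- ===== SOURCE A (Python) =====
-- def total_splits(grid, sr, sc):
--     """ BFS traversal counting splits (^)"""
--     from collections import deque
--
--     rows = len(grid)
--     queue = deque([(sr, sc)])
--     seen = set()
--     total = 0
--
--     while queue:
--         r, c = queue.popleft()
--         if (r, c) in seen:
--             continue
--         seen.add((r, c))
--
--         if r + 1 == rows:
--             continue
--
--         if grid[r + 1][c] == '^':
--             queue.append((r + 1, c - 1))
--             queue.append((r + 1, c + 1))
--             total += 1
--         else: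
--             queue.append((r + 1, c))
--
--     return total
-- ===== SOURCE B (Python) =====
-- def total_splits(grid, sr, sc):
--     """Row-by-row sweep with a frontier set of active columns (no cell queue / seen set)."""
--     rows = len(grid)
--     total = 0
--     frontier = {sc}
--     r = sr
--     while frontier and r + 1 != rows:
--         nxt = set()
--         for c in frontier:
--             if grid[r + 1][c] == '^':
--                 total += 1
--                 nxt.add(c - 1)
--                 nxt.add(c + 1)
--             else:
--                 nxt.add(c)
--         frontier = nxt
--         r += 1
--     return total
-- ===== Notes on version B (the rewrite author's own statement) =====
-- stated objective: simpler
-- what changed: Replaced the cell-queue BFS with a global seen set by a row-by-row sweep that keeps only the set of active columns of the current row, counting '^' hits as the frontier moves down; B matches A on every input where A returns, Pre_ only excludes the inputs where A raises IndexError.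
import Mathlib
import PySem

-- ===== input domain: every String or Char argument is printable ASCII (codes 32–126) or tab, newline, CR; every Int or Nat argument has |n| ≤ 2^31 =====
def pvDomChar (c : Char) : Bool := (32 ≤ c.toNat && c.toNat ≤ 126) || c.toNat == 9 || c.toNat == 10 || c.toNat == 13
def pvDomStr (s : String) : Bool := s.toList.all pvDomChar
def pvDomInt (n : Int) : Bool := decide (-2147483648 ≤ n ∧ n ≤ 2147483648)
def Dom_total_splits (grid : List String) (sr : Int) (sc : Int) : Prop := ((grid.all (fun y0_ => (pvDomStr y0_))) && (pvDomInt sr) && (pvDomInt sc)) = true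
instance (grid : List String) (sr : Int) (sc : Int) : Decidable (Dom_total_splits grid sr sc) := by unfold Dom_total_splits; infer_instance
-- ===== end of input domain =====

-- B replaces A's cell-queue BFS with a global seen set by a row-by-row sweep keeping only the
-- set of active columns of the current row (simpler decomposition, same return value).

-- grid[r+1][c] == '^'  (shared accessor; where the Python access raises IndexError the pyGet? is
-- none and the comparison is false — such inputs are outside Pre_total_splits)
def pvSplitAt (grid : List String) (r c : Int) : Bool :=
  PySem.Str.pyGet? ((PySem.List.pyGet? grid (r + 1)).getD "") c == some '^'

-- ===== PORT A =====
-- A's while-queue loop; fuel only totalises the loop (proved sufficient whenever sr ≤ rows - 1)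
def pvABfs (grid : List String) (rows : Int) : Nat → List (Int × Int) → PySem.Set (Int × Int) → Int → Int
  | 0, _, _, total => total
  | _ + 1, [], _, total => total
  | fuel + 1, (r, c) :: queue, seen, total =>
    if PySem.Set.contains seen (r, c) then
      pvABfs grid rows fuel queue seen total
    else
      let seen' := PySem.Set.add seen (r, c)
      if r + 1 = rows then pvABfs grid rows fuel queue seen' total
      else if pvSplitAt grid r c then
        pvABfs grid rows fuel (queue ++ [(r + 1, c - 1), (r + 1, c + 1)]) seen' (total + 1)
      else
        pvABfs grid rows fuel (queue ++ [(r + 1, c)]) seen' total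

def total_splits (grid : List String) (sr : Int) (sc : Int) : Int :=
  let rows : Int := grid.length
  pvABfs grid rows (3 ^ ((rows - sr).toNat + 3)) [(sr, sc)] PySem.Set.empty 0

-- ===== PORT B =====
-- B's while loop: the fuel counts the iterations of 'while frontier and r + 1 != rows'
-- (exactly (rows - sr - 1).toNat of them when sr ≤ rows - 1); the per-row for-loop is a fold
-- over the frontier set building the next set
def pvBLoop (grid : List String) : Nat → Int → PySem.Set Int → Int → Int
  | 0, _, _, total => total
  | k + 1, r, frontier, total =>
    if frontier.isEmpty then total
    else
      let st := frontier.foldl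
        (fun (p : PySem.Set Int × Int) c =>
          if pvSplitAt grid r c then (PySem.Set.add (PySem.Set.add p.1 (c - 1)) (c + 1), p.2 + 1)
          else (PySem.Set.add p.1 c, p.2))
        (PySem.Set.empty, total)
      pvBLoop grid k (r + 1) st.1 st.2

def total_splits_alt (grid : List String) (sr : Int) (sc : Int) : Int :=
  let rows : Int := grid.length
  pvBLoop grid (rows - sr - 1).toNat sr (PySem.Set.ofList [sc]) 0

-- ===== PRECONDITION & SPEC =====
-- children of active column c at row r (spec-level; used by Pre_ to describe the reached columns)
def pvKids (grid : List String) (r c : Int) : Finset Int :=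
  if pvSplitAt grid r c then {c - 1, c + 1} else {c}

-- the set of columns active at row sr + k
def pvReach (grid : List String) (sr sc : Int) : Nat → Finset Int
  | 0 => {sc}
  | k + 1 => (pvReach grid sr sc k).biUnion (pvKids grid (sr + k))

-- the access grid[r+1][c] succeeds in Python (row index is in range under Pre_'s sr bounds)
def pvColOk (grid : List String) (r c : Int) : Bool :=
  (PySem.Str.pyGet? ((PySem.List.pyGet? grid (r + 1)).getD "") c).isSome

-- Pre_ is exactly the domain of the Python A: sr must make the walk reach the bottom row without
-- the row index leaving [-rows, rows-1], and every column reached while walking down must be a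
-- valid (possibly negative, Python-wrapping) index into the row below; otherwise A raises IndexError.
def Pre_total_splits (grid : List String) (sr : Int) (sc : Int) : Prop :=
  -((grid.length : Int) + 1) ≤ sr ∧ sr ≤ (grid.length : Int) - 1 ∧
  ∀ k < ((grid.length : Int) - 1 - sr).toNat, ∀ c ∈ pvReach grid sr sc k, pvColOk grid (sr + k) c

instance (grid : List String) (sr : Int) (sc : Int) : Decidable (Pre_total_splits grid sr sc) := by
  unfold Pre_total_splits; infer_instance

def pvWitness_total_splits : List String × Int × Int := (["...", ".^.", "..."], 0, 1)

def Spec_total_splits (grid : List String) (sr : Int) (sc : Int) (out : Int) : Prop := out = total_splits_alt grid sr sc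
instance (grid : List String) (sr : Int) (sc : Int) (out : Int) : Decidable (Spec_total_splits grid sr sc out) := by unfold Spec_total_splits; infer_instance

-- ===== CLAIM (what is proved, stated in full; the proofs are below) =====
def Claim_equal_total_splits : Prop := ∀ (grid : List String) (sr : Int) (sc : Int), Dom_total_splits grid sr sc → Pre_total_splits grid sr sc → Spec_total_splits grid sr sc (total_splits grid sr sc)

-- ===== LEMMAS AND PROOFS =====

-- common functional specification: sum over k rows starting at row r with active-column set F
def pvNext (grid : List String) (r : Int) (F : Finset Int) : Finset Int :=
  F.biUnion (pvKids grid r)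

def pvCount (grid : List String) (r : Int) (F : Finset Int) : Int :=
  ((F.filter (fun c => pvSplitAt grid r c = true)).card : Int)

def pvSpecF (grid : List String) : Nat → Int → Finset Int → Int
  | 0, _, _ => 0
  | k + 1, r, F => pvCount grid r F + pvSpecF grid k (r + 1) (pvNext grid r F)

lemma pvSpecF_empty (grid : List String) (k : Nat) (r : Int) :
    pvSpecF grid k r ∅ = 0 := by
  induction k generalizing r with
  | zero => rfl
  | succ k ih => simp [pvSpecF, pvCount, pvNext, ih]

lemma pvToFinset_add {α : Type} [DecidableEq α] (s : PySem.Set α) (x : α) :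
    (PySem.Set.add s x).toFinset = insert x s.toFinset := by
  ext y; simp [PySem.Set.mem_add, or_comm]

-- ---------- B side ----------

lemma pvBFold (grid : List String) (r : Int) (l : List Int) :
    ∀ (s0 : PySem.Set Int) (t0 : Int),
      (List.foldl
        (fun (p : PySem.Set Int × Int) c =>
          if pvSplitAt grid r c then (PySem.Set.add (PySem.Set.add p.1 (c - 1)) (c + 1), p.2 + 1)
          else (PySem.Set.add p.1 c, p.2)) (s0, t0) l).1.toFinset
        = s0.toFinset ∪ l.toFinset.biUnion (pvKids grid r) ∧
      (List.foldl
        (fun (p : PySem.Set Int × Int) c =>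
          if pvSplitAt grid r c then (PySem.Set.add (PySem.Set.add p.1 (c - 1)) (c + 1), p.2 + 1)
          else (PySem.Set.add p.1 c, p.2)) (s0, t0) l).2
        = t0 + ((l.filter (fun c => pvSplitAt grid r c)).length : Int) := by
  induction l with
  | nil => intro s0 t0; simp
  | cons c l ih =>
    intro s0 t0
    by_cases hch : pvSplitAt grid r c
    · have h := ih (PySem.Set.add (PySem.Set.add s0 (c - 1)) (c + 1)) (t0 + 1)
      constructor
      · rw [List.foldl_cons, if_pos hch, h.1]
        ext y
        simp [pvToFinset_add, pvKids, hch]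
        tauto
      · rw [List.foldl_cons, if_pos hch, h.2, List.filter_cons, if_pos (by simpa using hch)]
        push_cast [List.length_cons]
        try ring
    · have h := ih (PySem.Set.add s0 c) t0
      constructor
      · rw [List.foldl_cons, if_neg hch, h.1]
        ext y
        simp [pvToFinset_add, pvKids, hch]
      · rw [List.foldl_cons, if_neg hch, h.2, List.filter_cons, if_neg (by simpa using hch)]

lemma pvBFoldNodup (grid : List String) (r : Int) (l : List Int) :
    ∀ (s0 : PySem.Set Int) (t0 : Int), s0.Nodup →
      (List.foldl
        (fun (p : PySem.Set Int × Int) c =>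
          if pvSplitAt grid r c then (PySem.Set.add (PySem.Set.add p.1 (c - 1)) (c + 1), p.2 + 1)
          else (PySem.Set.add p.1 c, p.2)) (s0, t0) l).1.Nodup := by
  induction l with
  | nil => intro s0 t0 h; exact h
  | cons c l ih =>
    intro s0 t0 h
    by_cases hch : pvSplitAt grid r c
    · rw [List.foldl_cons, if_pos hch]
      exact ih _ _ (PySem.Set.nodup_add _ _ (PySem.Set.nodup_add _ _ h))
    · rw [List.foldl_cons, if_neg hch]
      exact ih _ _ (PySem.Set.nodup_add _ _ h)

lemma pvNodup_filter_length (l : List Int) (hl : l.Nodup) (p : Int → Bool) :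
    ((l.filter p).length : Int) = ((l.toFinset.filter (fun c => p c = true)).card : Int) := by
  congr 1
  rw [← List.toFinset_card_of_nodup (hl.filter p), List.toFinset_filter]

lemma pvBLoop_spec (grid : List String) (k : Nat) :
    ∀ (r : Int) (F : PySem.Set Int) (total : Int), F.Nodup →
      pvBLoop grid k r F total = total + pvSpecF grid k r F.toFinset := by
  induction k with
  | zero => intro r F total _; simp [pvBLoop, pvSpecF]
  | succ k ih =>
    intro r F total hF
    by_cases hE : F.isEmpty
    · have : F = [] := List.isEmpty_iff.mp hE
      subst this
      simp [pvBLoop, pvSpecF_empty, pvSpecF, pvCount, pvNext]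
    · rw [pvBLoop, if_neg hE]
      have h := pvBFold grid r F PySem.Set.empty total
      rw [ih _ _ _ (pvBFoldNodup grid r F PySem.Set.empty total (by simp [PySem.Set.empty])),
          h.1, h.2, pvNodup_filter_length F hF]
      show total + _ + _ = total + pvSpecF grid (k+1) r F.toFinset
      rw [pvSpecF]
      have hU : (PySem.Set.empty : PySem.Set Int).toFinset ∪ F.toFinset.biUnion (pvKids grid r)
          = pvNext grid r F.toFinset := by
        simp [pvNext, PySem.Set.empty]
      rw [hU, pvCount]
      ring

-- ---------- A side ----------

-- fuel sufficient to drain a queue of n1 row-r cells and n2 row-(r+1) cells, k levels above bottom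
def pvBnd (k n1 n2 : Nat) : Nat := (3 * n1 + n2 + 1) * 3 ^ k

lemma pvCount_empty (grid : List String) (r : Int) : pvCount grid r ∅ = 0 := by
  simp [pvCount]

lemma pvNext_empty (grid : List String) (r : Int) : pvNext grid r ∅ = ∅ := by
  simp [pvNext]

lemma pvCount_insert (grid : List String) (r c : Int) (F : Finset Int) (h : c ∉ F) :
    pvCount grid r (insert c F) = (if pvSplitAt grid r c then 1 else 0) + pvCount grid r F := by
  unfold pvCount
  by_cases hs : pvSplitAt grid r c
  · rw [Finset.filter_insert, if_pos hs, Finset.card_insert_of_notMem (by simp [h]), if_pos hs]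
    push_cast; ring
  · rw [Finset.filter_insert, if_neg hs, if_neg hs]
    simp

lemma pvNext_insert (grid : List String) (r c : Int) (F : Finset Int) :
    pvNext grid r (insert c F) = pvKids grid r c ∪ pvNext grid r F := by
  unfold pvNext; exact Finset.biUnion_insert

lemma pvInsert_sdiff (c : Int) (X done : Finset Int) (h : c ∉ done) :
    (insert c X) \ done = insert c ((X \ done).erase c) := by
  ext y
  simp only [Finset.mem_sdiff, Finset.mem_insert, Finset.mem_erase]
  constructor
  · rintro ⟨h1 | h1, h2⟩
    · exact Or.inl h1
    · by_cases hy : y = c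
      · exact Or.inl hy
      · exact Or.inr ⟨hy, h1, h2⟩
  · rintro (h1 | ⟨h1, h2, h3⟩)
    · exact ⟨Or.inl h1, h1 ▸ h⟩
    · exact ⟨Or.inr h2, h3⟩

lemma pvSdiff_insert (c : Int) (X done : Finset Int) :
    X \ (insert c done) = (X \ done).erase c := by
  ext y
  simp only [Finset.mem_sdiff, Finset.mem_insert, Finset.mem_erase]
  tauto

-- fuel arithmetic
lemma pvBnd_pos (k n1 n2 : Nat) : 1 ≤ pvBnd k n1 n2 := by
  unfold pvBnd
  have h3 : 1 ≤ 3 ^ k := Nat.one_le_pow _ _ (by norm_num)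
  nlinarith

lemma pvBnd_pop (k n1 n2 m2 : Nat) (hm : m2 ≤ n2 + 2) (f : Nat)
    (h : pvBnd k (n1 + 1) n2 ≤ f + 1) : pvBnd k n1 m2 ≤ f := by
  unfold pvBnd at *
  have h3 : 1 ≤ 3 ^ k := Nat.one_le_pow _ _ (by norm_num)
  nlinarith

lemma pvBnd_level (k n2 f : Nat) (h : pvBnd (k + 1) 0 n2 ≤ f) : pvBnd k n2 0 ≤ f := by
  unfold pvBnd at *
  have h3 : 1 ≤ 3 ^ k := Nat.one_le_pow _ _ (by norm_num)
  calc (3 * n2 + 0 + 1) * 3 ^ k ≤ (3 * 0 + n2 + 1) * 3 ^ (k + 1) := by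
        rw [pow_succ]; nlinarith
    _ ≤ f := h

lemma pvA_run (grid : List String) (rows : Int) :
    ∀ (k fuel : Nat) (r : Int) (cs1 cs2 : List Int) (done : Finset Int)
      (seen : PySem.Set (Int × Int)) (total : Int),
      ((rows - 1 - r).toNat = k) → r ≤ rows - 1 →
      (∀ p ∈ seen, p.1 ≤ r) →
      (∀ c : Int, (r, c) ∈ seen ↔ c ∈ done) →
      (r = rows - 1 → cs2 = []) →
      pvBnd k cs1.length cs2.length ≤ fuel →
      pvABfs grid rows fuel
          (cs1.map (fun c => (r, c)) ++ cs2.map (fun c => (r + 1, c))) seen total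
        = total + (if r < rows - 1
            then pvCount grid r (cs1.toFinset \ done)
               + pvSpecF grid (rows - 2 - r).toNat (r + 1)
                   (cs2.toFinset ∪ pvNext grid r (cs1.toFinset \ done))
            else 0) := by
  intro k
  induction k with
  | zero =>
    intro fuel
    induction fuel with
    | zero =>
      intro r cs1 cs2 done seen total hk hr hs hd hc2 hf
      exact absurd hf (by have := pvBnd_pos 0 cs1.length cs2.length; omega)
    | succ fuel ihf =>
      intro r cs1 cs2 done seen total hk hr hs hd hc2 hf
      have hr' : r = rows - 1 := by omega
      subst hr'
      rw [hc2 rfl] at hf ⊢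
      match cs1 with
      | [] =>
        simp [pvABfs]
      | c :: cs1' =>
        rw [if_neg (lt_irrefl _)]
        simp only [List.map_cons, List.map_nil, List.append_nil, pvABfs]
        by_cases hmem : c ∈ done
        · rw [if_pos ((PySem.Set.contains_iff _ _).mpr ((hd c).mpr hmem))]
          have := ihf (rows - 1) cs1' [] done seen total hk hr hs hd (fun _ => rfl)
            (pvBnd_pop 0 cs1'.length 0 0 (by omega) fuel (by simpa using hf))
          simpa [if_neg (lt_irrefl ((rows : Int) - 1))] using this
        · rw [if_neg (fun h => hmem ((hd c).mp ((PySem.Set.contains_iff _ _).mp h)))]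
          rw [if_pos (by ring)]
          have hd' : ∀ c' : Int, (rows - 1, c') ∈ PySem.Set.add seen (rows - 1, c)
              ↔ c' ∈ insert c done := by
            intro c'
            rw [PySem.Set.mem_add]
            simp only [Finset.mem_insert, Prod.mk.injEq]
            rw [hd c']
            tauto
          have hs' : ∀ p ∈ PySem.Set.add seen (rows - 1, c), p.1 ≤ rows - 1 := by
            intro p hp
            rcases (PySem.Set.mem_add _ _ _).mp hp with h | h
            · exact hs p h
            · rw [h]
          have := ihf (rows - 1) cs1' [] (insert c done) (PySem.Set.add seen (rows - 1, c))
            total hk hr hs' hd' (fun _ => rfl)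
            (pvBnd_pop 0 cs1'.length 0 0 (by omega) fuel (by simpa using hf))
          simpa [if_neg (lt_irrefl ((rows : Int) - 1))] using this
  | succ k ihk =>
    intro fuel
    induction fuel with
    | zero =>
      intro r cs1 cs2 done seen total hk hr hs hd hc2 hf
      exact absurd hf (by have := pvBnd_pos (k + 1) cs1.length cs2.length; omega)
    | succ fuel ihf =>
      intro r cs1 cs2 done seen total hk hr hs hd hc2 hf
      have hrlt : r < rows - 1 := by omega
      rw [if_pos hrlt]
      match cs1 with
      | [] =>
        match cs2 with
        | [] =>
          simp [pvABfs, pvCount_empty, pvNext_empty, pvSpecF_empty]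
        | c2 :: cs2' =>
          -- level change: the whole queue is row r+1; restart the lemma one level down
          have hk' : ((rows : Int) - 1 - (r + 1)).toNat = k := by omega
          have hd' : ∀ c : Int, (r + 1, c) ∈ seen ↔ c ∈ (∅ : Finset Int) := by
            intro c
            simp only [Finset.notMem_empty, iff_false]
            intro h
            have := hs _ h
            simp at this
          have hlvl := ihk (fuel + 1) (r + 1) (c2 :: cs2') [] ∅ seen total hk' (by omega)
            (fun p hp => by have := hs p hp; omega) hd' (fun _ => rfl)
            (pvBnd_level k (c2 :: cs2').length (fuel + 1) (by simpa using hf))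
          simp only [List.map_nil, List.nil_append, List.append_nil] at hlvl ⊢
          rw [hlvl]
          have hm : ((rows : Int) - 2 - r).toNat = k := by omega
          rw [hm]
          match k, hk' with
          | 0, hk' =>
            have : ¬ (r + 1 < rows - 1) := by omega
            rw [if_neg this]
            simp [pvSpecF, pvCount_empty]
          | k' + 1, hk' =>
            rw [if_pos (by omega)]
            have hm' : ((rows : Int) - 2 - (r + 1)).toNat = k' := by omega
            rw [hm']
            simp [pvSpecF, pvCount_empty, pvNext_empty]
      | c :: cs1' =>
        simp only [List.map_cons, List.cons_append, pvABfs]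
        by_cases hmem : c ∈ done
        · rw [if_pos ((PySem.Set.contains_iff _ _).mpr ((hd c).mpr hmem))]
          have := ihf r cs1' cs2 done seen total hk hr hs hd hc2
            (pvBnd_pop (k + 1) cs1'.length cs2.length cs2.length (by omega) fuel (by simpa using hf))
          rw [if_pos hrlt] at this
          rw [this]
          have he : (c :: cs1').toFinset \ done = cs1'.toFinset \ done := by
            rw [List.toFinset_cons, Finset.insert_sdiff_of_mem _ hmem]
          rw [he]
        · rw [if_neg (fun h => hmem ((hd c).mp ((PySem.Set.contains_iff _ _).mp h)))]
          rw [if_neg (by omega : ¬ r + 1 = rows)]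
          have hd' : ∀ c' : Int, (r, c') ∈ PySem.Set.add seen (r, c) ↔ c' ∈ insert c done := by
            intro c'
            rw [PySem.Set.mem_add]
            simp only [Finset.mem_insert, Prod.mk.injEq]
            rw [hd c']
            tauto
          have hs' : ∀ p ∈ PySem.Set.add seen (r, c), p.1 ≤ r := by
            intro p hp
            rcases (PySem.Set.mem_add _ _ _).mp hp with h | h
            · exact hs p h
            · rw [h]
          have hcnotT : c ∉ (cs1'.toFinset \ done).erase c := Finset.notMem_erase _ _
          have hsets : (c :: cs1').toFinset \ done
              = insert c ((cs1'.toFinset \ done).erase c) := by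
            rw [List.toFinset_cons, pvInsert_sdiff c _ _ hmem]
          by_cases hsp : pvSplitAt grid r c
          · rw [if_pos hsp]
            have hq : cs1'.map (fun c => ((r : Int), c)) ++ cs2.map (fun c => (r + 1, c))
                ++ [(r + 1, c - 1), (r + 1, c + 1)]
                = cs1'.map (fun c => ((r : Int), c))
                  ++ (cs2 ++ [c - 1, c + 1]).map (fun c => (r + 1, c)) := by
              simp
            rw [hq]
            have := ihf r cs1' (cs2 ++ [c - 1, c + 1]) (insert c done)
              (PySem.Set.add seen (r, c)) (total + 1) hk hr hs' hd'
              (fun h => absurd h (by omega))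
              (pvBnd_pop (k + 1) cs1'.length cs2.length (cs2 ++ [c - 1, c + 1]).length
                (by simp) fuel (by simpa using hf))
            rw [if_pos hrlt] at this
            rw [this, hsets, pvSdiff_insert,
                pvCount_insert grid r c _ hcnotT, pvNext_insert, if_pos hsp]
            have hkid : pvKids grid r c = {c - 1, c + 1} := by rw [pvKids, if_pos hsp]
            have hU : (cs2 ++ [c - 1, c + 1]).toFinset
                  ∪ pvNext grid r ((cs1'.toFinset \ done).erase c)
                = cs2.toFinset ∪ (pvKids grid r c
                    ∪ pvNext grid r ((cs1'.toFinset \ done).erase c)) := by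
              rw [hkid]
              ext y
              simp only [List.toFinset_append, Finset.mem_union, List.toFinset_cons,
                List.toFinset_nil, Finset.mem_insert, Finset.mem_singleton, Finset.notMem_empty]
              tauto
            rw [hU]
            ring
          · rw [if_neg hsp]
            have hq : cs1'.map (fun c => ((r : Int), c)) ++ cs2.map (fun c => (r + 1, c))
                ++ [(r + 1, c)]
                = cs1'.map (fun c => ((r : Int), c)) ++ (cs2 ++ [c]).map (fun c => (r + 1, c)) := by
              simp
            rw [hq]
            have := ihf r cs1' (cs2 ++ [c]) (insert c done)
              (PySem.Set.add seen (r, c)) total hk hr hs' hd'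
              (fun h => absurd h (by omega))
              (pvBnd_pop (k + 1) cs1'.length cs2.length (cs2 ++ [c]).length
                (by simp) fuel (by simpa using hf))
            rw [if_pos hrlt] at this
            rw [this, hsets, pvSdiff_insert,
                pvCount_insert grid r c _ hcnotT, pvNext_insert, if_neg hsp]
            have hkid : pvKids grid r c = {c} := by rw [pvKids, if_neg hsp]
            have hU : (cs2 ++ [c]).toFinset ∪ pvNext grid r ((cs1'.toFinset \ done).erase c)
                = cs2.toFinset ∪ (pvKids grid r c
                    ∪ pvNext grid r ((cs1'.toFinset \ done).erase c)) := by
              rw [hkid]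
              ext y
              simp only [List.toFinset_append, Finset.mem_union, List.toFinset_cons,
                List.toFinset_nil, Finset.mem_insert, Finset.mem_singleton, Finset.notMem_empty]
              tauto
            rw [hU]
            ring

theorem pvPorts_eq (grid : List String) (sr sc : Int)
    (_h1 : -((grid.length : Int) + 1) ≤ sr) (h2 : sr ≤ (grid.length : Int) - 1) :
    total_splits grid sr sc = total_splits_alt grid sr sc := by
  unfold total_splits total_splits_alt
  have hK : ((grid.length : Int) - sr).toNat = ((grid.length : Int) - 1 - sr).toNat + 1 := by
    omega
  set rows : Int := (grid.length : Int) with hrows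
  set K : Nat := (rows - 1 - sr).toNat with hKdef
  have hfuel : pvBnd K 1 0 ≤ 3 ^ ((rows - sr).toNat + 3) := by
    rw [hK]
    unfold pvBnd
    calc (3 * 1 + 0 + 1) * 3 ^ K = 4 * 3 ^ K := by ring
      _ ≤ 81 * 3 ^ K := Nat.mul_le_mul_right _ (by norm_num)
      _ = 3 ^ (K + 1 + 3) := by ring
  have hA := pvA_run grid rows K (3 ^ ((rows - sr).toNat + 3)) sr [sc] [] ∅ PySem.Set.empty 0
    rfl h2 (by intro p hp; simp [PySem.Set.empty] at hp) (by intro c; simp [PySem.Set.empty])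
    (fun _ => rfl) hfuel
  simp only [List.map_cons, List.map_nil, List.append_nil] at hA
  rw [hA]
  have hofl : PySem.Set.ofList [sc] = [sc] :=
    PySem.Set.ofList_eq_self_of_nodup _ (by simp)
  rw [hofl]
  have hB := pvBLoop_spec grid (rows - sr - 1).toNat sr [sc] 0 (by simp)
  rw [hB]
  have hKB : (rows - sr - 1).toNat = K := by omega
  rw [hKB]
  have hTF : ([sc] : List Int).toFinset = {sc} := by simp
  rw [hTF]
  match hKc : K, hKdef with
  | 0, hKdef =>
    have : ¬ (sr < rows - 1) := by omega
    rw [if_neg this]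
    simp [pvSpecF]
  | K' + 1, hKdef =>
    rw [if_pos (by omega)]
    have hm : (rows - 2 - sr).toNat = K' := by omega
    rw [hm]
    simp [pvSpecF, Finset.sdiff_empty]

-- ===== VERDICT (by name: the statement is the Claim_ definition above) =====
theorem total_splits_spec : Claim_equal_total_splits := by
  intro grid sr sc _ hPre
  exact pvPorts_eq grid sr sc hPre.1 hPre.2.1
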